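-- pv_equiv track=rewrite | github.com/Ben-Edwards44/Advent-Of-Code | 2023/day13.py | new_cols
-- ===== SOURCE A (Python) =====
-- def get_num_diff(list1, list2):
--     num = 0
--     for i, x in zip(list1, list2):
--         if i != x:
--             num += 1
--
--         if num > 1:
--             #doesn't really matter if num > 1
--             return num
--
--     return num
--
-- def get_col_diff(grid, left_inx):
--     right_inx = left_inx + 1
--
--     num_diff = 0
--     while 0 <= left_inx and right_inx < len(grid[0]):
--         col1 = [i[left_inx] for i in grid]
--         col2 = [i[right_inx] for i in grid]
--
--         left_inx -= 1
--         right_inx += 1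
--
--         num_diff += get_num_diff(col1, col2)
--
--         if num_diff > 1:
--             return num_diff
--
--     return num_diff
--
-- def new_cols(grid):
--     left_sum = 0
--     total = 0
--     for i in range(len(grid[0]) - 1):
--         left_sum += 1
--
--         if get_col_diff(grid, i) == 1:
--             total += left_sum
--
--     return total
-- ===== SOURCE B (Python) =====
-- def new_cols(grid):
--     w = len(grid[0])
--     if w < 2:
--         return 0
--     cols = ["".join(row[c] for row in grid) for c in range(w)]
--     ids = {}
--     cid = [ids.setdefault(col, len(ids)) for col in cols]
--     total = 0
--     for i in range(w - 1):
--         bad = [(l, r) for l, r in zip(range(i, -1, -1), range(i + 1, w))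
--                if cid[l] != cid[r]]
--         if len(bad) == 1:
--             l, r = bad[0]
--             if sum(a != b for a, b in zip(cols[l], cols[r])) == 1:
--                 total += i + 1
--     return total
-- ===== Notes on version B (the rewrite author's own statement) =====
-- stated objective: alternative
-- what changed: B interns each column once into a dict of small ids and decides each mirror position by a different criterion: exactly one mirrored pair must have unequal ids (an O(1) id comparison per pair) and that single pair must differ in exactly one character, replacing A's outward two-pointer loop that accumulates capped character-difference counts with early exits.
import Mathlib
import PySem

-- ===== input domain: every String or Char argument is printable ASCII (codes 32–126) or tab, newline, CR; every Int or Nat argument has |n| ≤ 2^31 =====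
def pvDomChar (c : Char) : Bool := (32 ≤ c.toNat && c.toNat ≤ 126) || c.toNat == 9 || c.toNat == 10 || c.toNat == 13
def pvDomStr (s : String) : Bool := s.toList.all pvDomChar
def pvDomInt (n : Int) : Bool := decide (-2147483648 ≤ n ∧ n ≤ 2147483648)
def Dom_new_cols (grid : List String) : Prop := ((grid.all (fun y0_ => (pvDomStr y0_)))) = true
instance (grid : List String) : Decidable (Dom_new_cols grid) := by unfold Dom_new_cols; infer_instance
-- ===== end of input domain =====

-- B interns each column into a dict of small ids and accepts a mirror position iff exactly one
-- mirrored pair has unequal ids and that single pair differs in exactly one character, instead of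
-- A's outward two-pointer loop accumulating capped character-difference counts; objective: alternative.


-- ===== PORT A =====
-- get_num_diff: loop over zip with accumulator and early return once num > 1
def getNumDiffAux : Int → List (Option Char × Option Char) → Int
  | num, [] => num
  | num, (i, x) :: rest =>
    let num' := if i ≠ x then num + 1 else num
    if num' > 1 then num' else getNumDiffAux num' rest

def getNumDiff (l1 l2 : List (Option Char)) : Int :=
  getNumDiffAux 0 (l1.zip l2)

-- [i[j] for i in grid]  (Option: none = IndexError, excluded by Pre_)
def colOf (grid : List String) (j : Int) : List (Option Char) :=
  grid.map (fun r => PySem.Str.pyGet? r j)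

-- the while loop of get_col_diff
def getColDiffLoop (grid : List String) (w : Int) (left right numDiff : Int) : Int :=
  if h : 0 ≤ left ∧ right < w then
    let col1 := colOf grid left
    let col2 := colOf grid right
    let nd := numDiff + getNumDiff col1 col2
    if nd > 1 then nd else getColDiffLoop grid w (left - 1) (right + 1) nd
  else numDiff
termination_by (w - right).toNat
decreasing_by omega

-- get_col_diff (len(grid[0]) ported via headD: Pre_ excludes the empty grid, where Python raises)
def getColDiff (grid : List String) (leftInx : Int) : Int :=
  getColDiffLoop grid (PySem.Str.len (grid.headD "")) leftInx (leftInx + 1) 0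

def new_cols (grid : List String) : Int :=
  ((PySem.List.pyRange 0 (PySem.Str.len (grid.headD "") - 1) 1).foldl
    (fun (st : Int × Int) i =>
      let leftSum := st.1 + 1
      if getColDiff grid i = 1 then (leftSum, st.2 + leftSum) else (leftSum, st.2))
    (0, 0)).2

-- ===== PORT B =====
-- B's cols comprehension is character-for-character the same as A's column extraction,
-- so it shares the helper colOf ("".join(row[c] for row in grid), none = IndexError)

-- one step of the interning comprehension: cid.append(ids.setdefault(col, len(ids)))
def internStep (st : PySem.Dict (List (Option Char)) Int × List Int) (c : List (Option Char)) :
    PySem.Dict (List (Option Char)) Int × List Int :=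
  (st.1.setdefault c (st.1.size : Int), st.2 ++ [(st.1.get? c).getD (st.1.size : Int)])

-- sum(a != b for a, b in zip(cols[l], cols[r]))
def diffCount (ca cb : List (Option Char)) : Int :=
  (ca.zip cb).foldl (fun s q => s + (if q.1 ≠ q.2 then 1 else 0)) 0

def new_cols_alt (grid : List String) : Int :=
  let w := (grid.headD "").toList.length   -- len(grid[0]); Pre_ excludes the empty grid
  if w < 2 then 0
  else
    let cols := (List.range w).map (fun (c : Nat) => colOf grid (c : Int))
    let cid := (cols.foldl internStep (PySem.Dict.empty, [])).2
    (List.range (w - 1)).foldl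
      (fun (total : Int) (i : Nat) =>
        -- cid[l], cid[r], cols[l], cols[r]: indices produced by the ranges are always in range,
        -- so pyGetD is exact here
        let bad := ((PySem.List.pyRange (i : Int) (-1) (-1)).zip
                    (PySem.List.pyRange ((i : Int) + 1) (w : Int) 1)).filter
          (fun p => PySem.List.pyGetD cid p.1 0 != PySem.List.pyGetD cid p.2 0)
        if bad.length = 1 then
          let p := bad.headD (0, 0)
          if diffCount (PySem.List.pyGetD cols p.1 []) (PySem.List.pyGetD cols p.2 []) = 1
          then total + ((i : Int) + 1) else total
        else total) 0

-- ===== PRECONDITION & SPEC =====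
-- Pre_ admits exactly the inputs on which Python A returns: the grid is nonempty, and when its
-- first row has at least 2 columns every row is at least that wide (otherwise column extraction
-- raises IndexError; with fewer than 2 columns the loop body never runs and nothing is indexed).
def Pre_new_cols (grid : List String) : Prop :=
  grid ≠ [] ∧ (2 ≤ (grid.headD "").toList.length →
    ∀ r ∈ grid, (grid.headD "").toList.length ≤ r.toList.length)
instance (grid : List String) : Decidable (Pre_new_cols grid) := by unfold Pre_new_cols; infer_instance

def pvWitness_new_cols : List String := (["#.#", "..#"])

def Spec_new_cols (grid : List String) (out : Int) : Prop := out = new_cols_alt grid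
instance (grid : List String) (out : Int) : Decidable (Spec_new_cols grid out) := by unfold Spec_new_cols; infer_instance

-- ===== CLAIM (what is proved, stated in full; the proofs are below) =====
def Claim_equal_new_cols : Prop := ∀ (grid : List String), Dom_new_cols grid → Pre_new_cols grid → Spec_new_cols grid (new_cols grid)

-- ===== LEMMAS AND PROOFS =====

-- full difference count of a zipped pair list
def cnt : List (Option Char × Option Char) → Int
  | [] => 0
  | p :: rest => (if p.1 ≠ p.2 then 1 else 0) + cnt rest

theorem cnt_nonneg (l : List (Option Char × Option Char)) : 0 ≤ cnt l := by
  induction l with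
  | nil => simp [cnt]
  | cons p rest ih => simp only [cnt]; split <;> omega

theorem getNumDiffAux_eq (l : List (Option Char × Option Char)) :
    ∀ num : Int, 0 ≤ num → num + cnt l ≤ 1 → getNumDiffAux num l = num + cnt l := by
  induction l with
  | nil => intro num _ _; simp [getNumDiffAux, cnt]
  | cons p rest ih =>
    intro num h0 h1
    obtain ⟨i, x⟩ := p
    have hc := cnt_nonneg rest
    simp only [getNumDiffAux, cnt] at h1 ⊢
    split_ifs at h1 ⊢ with hne hgt hgt
    · omega
    · rw [ih (num + 1) (by omega) (by omega)]; ring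
    · omega
    · rw [ih num h0 (by omega)]; ring

theorem getNumDiffAux_ge (l : List (Option Char × Option Char)) :
    ∀ num : Int, 0 ≤ num → 2 ≤ num + cnt l → 2 ≤ getNumDiffAux num l := by
  induction l with
  | nil => intro num _ h; simpa [getNumDiffAux, cnt] using h
  | cons p rest ih =>
    intro num h0 h2
    obtain ⟨i, x⟩ := p
    have hc := cnt_nonneg rest
    simp only [getNumDiffAux, cnt] at h2 ⊢
    split_ifs at h2 ⊢ with hne hgt hgt
    · omega
    · exact ih (num + 1) (by omega) (by omega)
    · omega
    · exact ih num h0 (by omega)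

-- full mirrored difference count, with the same loop shape as getColDiffLoop
def mirrorCnt (grid : List String) (w left right : Int) : Int :=
  if _h : 0 ≤ left ∧ right < w then
    cnt ((colOf grid left).zip (colOf grid right)) + mirrorCnt grid w (left - 1) (right + 1)
  else 0
termination_by (w - right).toNat
decreasing_by omega

theorem mirrorCnt_nonneg (grid : List String) (w left right : Int) :
    0 ≤ mirrorCnt grid w left right := by
  fun_induction mirrorCnt grid w left right with
  | case1 l r h ih => have := cnt_nonneg ((colOf grid l).zip (colOf grid r)); omega
  | case2 l r _h => omega

theorem getColDiffLoop_eq (grid : List String) (w : Int) :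
    ∀ left right nd : Int, 0 ≤ nd → nd + mirrorCnt grid w left right ≤ 1 →
      getColDiffLoop grid w left right nd = nd + mirrorCnt grid w left right := by
  intro left right
  fun_induction mirrorCnt grid w left right with
  | case1 l r h ih =>
    intro nd h0 h1
    have hc := cnt_nonneg ((colOf grid l).zip (colOf grid r))
    have hm := mirrorCnt_nonneg grid w (l - 1) (r + 1)
    rw [getColDiffLoop, dif_pos h]
    have hnum : getNumDiff (colOf grid l) (colOf grid r)
        = cnt ((colOf grid l).zip (colOf grid r)) := by
      have := getNumDiffAux_eq ((colOf grid l).zip (colOf grid r)) 0 le_rfl (by omega)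
      simpa [getNumDiff] using this
    show (if nd + getNumDiff (colOf grid l) (colOf grid r) > 1 then nd + getNumDiff (colOf grid l) (colOf grid r)
          else getColDiffLoop grid w (l - 1) (r + 1) (nd + getNumDiff (colOf grid l) (colOf grid r))) = _
    rw [hnum]
    split_ifs with hgt
    · omega
    · rw [ih _ (by omega) (by omega)]; ring
  | case2 l r h =>
    intro nd h0 h1
    rw [getColDiffLoop, dif_neg h]
    omega

theorem getColDiffLoop_ge (grid : List String) (w : Int) :
    ∀ left right nd : Int, 0 ≤ nd → nd ≤ 1 → 2 ≤ nd + mirrorCnt grid w left right →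
      2 ≤ getColDiffLoop grid w left right nd := by
  intro left right
  fun_induction mirrorCnt grid w left right with
  | case1 l r h ih =>
    intro nd h0 h1 h2
    have hc := cnt_nonneg ((colOf grid l).zip (colOf grid r))
    have hm := mirrorCnt_nonneg grid w (l - 1) (r + 1)
    rw [getColDiffLoop, dif_pos h]
    show (2 : Int) ≤ (if nd + getNumDiff (colOf grid l) (colOf grid r) > 1 then nd + getNumDiff (colOf grid l) (colOf grid r)
          else getColDiffLoop grid w (l - 1) (r + 1) (nd + getNumDiff (colOf grid l) (colOf grid r)))
    by_cases hbig : 2 ≤ cnt ((colOf grid l).zip (colOf grid r))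
    · have hg : 2 ≤ getNumDiff (colOf grid l) (colOf grid r) := by
        have := getNumDiffAux_ge ((colOf grid l).zip (colOf grid r)) 0 le_rfl (by omega)
        simpa [getNumDiff] using this
      split_ifs with hgt <;> omega
    · have hnum : getNumDiff (colOf grid l) (colOf grid r)
          = cnt ((colOf grid l).zip (colOf grid r)) := by
        have := getNumDiffAux_eq ((colOf grid l).zip (colOf grid r)) 0 le_rfl (by omega)
        simpa [getNumDiff] using this
      rw [hnum]
      split_ifs with hgt
      · omega
      · exact ih _ (by omega) (by omega) (by omega)
  | case2 l r h =>
    intro nd h0 h1 h2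
    rw [getColDiffLoop, dif_neg h]
    omega

theorem loop_eq_one_iff (grid : List String) (w left right : Int) :
    getColDiffLoop grid w left right 0 = 1 ↔ mirrorCnt grid w left right = 1 := by
  have hm := mirrorCnt_nonneg grid w left right
  by_cases hle : mirrorCnt grid w left right ≤ 1
  · have := getColDiffLoop_eq grid w left right 0 le_rfl (by omega)
    omega
  · have := getColDiffLoop_ge grid w left right 0 le_rfl (by omega) (by omega)
    omega

-- ----- B-side lemmas -----

theorem diffCount_eq_cnt (ca cb : List (Option Char)) : diffCount ca cb = cnt (ca.zip cb) := by
  unfold diffCount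
  generalize ca.zip cb = l
  suffices h : ∀ (l : List (Option Char × Option Char)) (a : Int),
      l.foldl (fun s q => s + (if q.1 ≠ q.2 then 1 else 0)) a = a + cnt l by
    simpa using h l 0
  intro l
  induction l with
  | nil => intro a; simp [cnt]
  | cons p rest ih => intro a; simp only [List.foldl, cnt]; rw [ih]; ring

theorem cnt_zip_eq_zero_iff :
    ∀ (ca cb : List (Option Char)), ca.length = cb.length → (cnt (ca.zip cb) = 0 ↔ ca = cb) := by
  intro ca
  induction ca with
  | nil => intro cb h; cases cb <;> simp [cnt] at h ⊢
  | cons a ca ih =>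
    intro cb h
    cases cb with
    | nil => simp at h
    | cons b cb =>
      simp only [List.zip_cons_cons, cnt, List.cons.injEq]
      have hc := cnt_nonneg (ca.zip cb)
      have := ih cb (by simpa using h)
      split_ifs with hne
      · constructor
        · intro he; omega
        · rintro ⟨rfl, _⟩; exact absurd rfl hne
      · simp only [ne_eq, not_not] at hne
        constructor
        · intro he; exact ⟨hne, this.mp (by omega)⟩
        · rintro ⟨_, rfl⟩; simpa using this.mpr rfl

-- generic nonnegative pair sum
def pairSumF (f : Int × Int → Int) : List (Int × Int) → Int
  | [] => 0
  | p :: rest => f p + pairSumF f rest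

theorem pairSumF_nonneg (f : Int × Int → Int) (L : List (Int × Int))
    (hf : ∀ p ∈ L, 0 ≤ f p) : 0 ≤ pairSumF f L := by
  induction L with
  | nil => simp [pairSumF]
  | cons p rest ih =>
    have h1 := hf p (by simp)
    have h2 := ih (fun q hq => hf q (by simp [hq]))
    simp only [pairSumF]; omega

theorem pairSumF_le_of_mem (f : Int × Int → Int) (L : List (Int × Int)) (q : Int × Int)
    (hq : q ∈ L) (hf : ∀ p ∈ L, 0 ≤ f p) : f q ≤ pairSumF f L := by
  induction L with
  | nil => simp at hq
  | cons r rs ih =>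
    simp only [pairSumF]
    have hs := pairSumF_nonneg f rs (fun p hp => hf p (by simp [hp]))
    rcases List.mem_cons.mp hq with rfl | hq'
    · omega
    · have h1 := hf r (by simp)
      have := ih hq' (fun p hp => hf p (by simp [hp]))
      omega

theorem pairSumF_eq_zero_of_all (f : Int × Int → Int) (L : List (Int × Int))
    (h : ∀ q ∈ L, f q = 0) : pairSumF f L = 0 := by
  induction L with
  | nil => rfl
  | cons r rs ih =>
    simp only [pairSumF]
    rw [h r (by simp), ih (fun q hq => h q (by simp [hq]))]
    simp

theorem sum_eq_one_iff (f : Int × Int → Int) (L : List (Int × Int))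
    (hf : ∀ p ∈ L, 0 ≤ f p) :
    pairSumF f L = 1 ↔
      ((L.filter (fun p => decide (f p ≠ 0))).length = 1 ∧
        f ((L.filter (fun p => decide (f p ≠ 0))).headD (0, 0)) = 1) := by
  induction L with
  | nil => simp [pairSumF]
  | cons p rest ih =>
    have hp := hf p (by simp)
    have hrest : ∀ q ∈ rest, 0 ≤ f q := fun q hq => hf q (List.mem_cons_of_mem p hq)
    have hsr := pairSumF_nonneg f rest hrest
    have ihr := ih hrest
    by_cases hz : f p = 0
    · simp only [pairSumF, hz, List.filter_cons, decide_eq_true_eq]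
      rw [if_neg (by omega)]
      constructor
      · intro h; exact ihr.mp (by omega)
      · intro h; have := ihr.mpr h; omega
    · simp only [pairSumF, List.filter_cons, decide_eq_true_eq]
      rw [if_pos (by simp [hz])]
      constructor
      · intro h
        have hfil : rest.filter (fun q => decide (f q ≠ 0)) = [] := by
          rw [List.filter_eq_nil_iff]
          intro q hq
          have h0 := hrest q hq
          by_contra hne
          simp only [decide_eq_true_eq] at hne
          have := pairSumF_le_of_mem f rest q hq hrest
          omega
        have hz0 : pairSumF f rest = 0 := by
          apply pairSumF_eq_zero_of_all
          intro q hq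
          have := List.filter_eq_nil_iff.mp hfil q hq
          simpa using this
        rw [hfil]
        refine ⟨by simp, ?_⟩
        simp only [List.headD_cons]
        omega
      · rintro ⟨hlen, hhead⟩
        have hfil : rest.filter (fun q => decide (f q ≠ 0)) = [] := by
          cases hfe : rest.filter (fun q => decide (f q ≠ 0)) with
          | nil => rfl
          | cons x xs => rw [hfe] at hlen; simp at hlen
        rw [hfil] at hhead
        simp only [List.headD] at hhead
        have hz0 : pairSumF f rest = 0 := by
          apply pairSumF_eq_zero_of_all
          intro q hq
          have := List.filter_eq_nil_iff.mp hfil q hq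
          simpa using this
        omega

-- the mirrored pair list and its sum
theorem mirrorCnt_eq_pairSumF (grid : List String) (w : Int) :
    ∀ left right : Int,
      mirrorCnt grid w left right =
        pairSumF (fun p => cnt ((colOf grid p.1).zip (colOf grid p.2)))
          ((PySem.List.pyRange left (-1) (-1)).zip (PySem.List.pyRange right w 1)) := by
  intro left right
  fun_induction mirrorCnt grid w left right with
  | case1 l r h ih =>
    rw [PySem.List.pyRange_neg_one_cons (by omega), PySem.List.pyRange_one_cons (by omega)]
    simp only [List.zip_cons_cons, pairSumF]
    rw [← ih]
  | case2 l r h =>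
    rcases (by omega : l < 0 ∨ w ≤ r) with hl | hr
    · rw [PySem.List.pyRange_neg_one_eq_nil (by omega)]; simp [pairSumF]
    · rw [PySem.List.pyRange_one_eq_nil (by omega)]; simp [pairSumF]

-- ----- interning correctness -----

def InvD (d : PySem.Dict (List (Option Char)) Int) : Prop :=
  (∀ c₁ c₂ v, d.get? c₁ = some v → d.get? c₂ = some v → c₁ = c₂) ∧
  (∀ c v, d.get? c = some v → v < (d.size : Int))

theorem internStep_inv (d : PySem.Dict (List (Option Char)) Int) (out : List Int)
    (c : List (Option Char)) (hd : InvD d) :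
    InvD (internStep (d, out) c).1 ∧
    (internStep (d, out) c).2 = out ++ [((d.get? c).getD (d.size : Int))] ∧
    (∀ c' v, d.get? c' = some v → (internStep (d, out) c).1.get? c' = some v) ∧
    (internStep (d, out) c).1.get? c = some ((d.get? c).getD (d.size : Int)) := by
  by_cases hc : d.contains c = true
  · have hget : ∃ v, d.get? c = some v := by
      have := PySem.Dict.contains_eq_isSome_get? d c
      rw [hc] at this
      cases h : d.get? c with
      | none => rw [h] at this; simp at this
      | some v => exact ⟨v, rfl⟩
    obtain ⟨v, hv⟩ := hget
    have hstep : internStep (d, out) c = (d, out ++ [(d.get? c).getD ((d.size : Int))]) := by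
      simp [internStep, PySem.Dict.setdefault_of_contains d _ hc]
    rw [hstep]
    exact ⟨hd, rfl, fun c' v' h => h, by simp [hv]⟩
  · have hc' : d.contains c = false := by simpa using hc
    have hnone : d.get? c = none := (PySem.Dict.get?_eq_none_iff_contains d c).mpr hc'
    have hstep : internStep (d, out) c = (d.insert c ((d.size : Int)), out ++ [((d.size : Int))]) := by
      simp [internStep, PySem.Dict.setdefault_of_not_contains d _ hc', hnone]
    rw [hstep]
    have hsize : (d.insert c ((d.size : Int))).size = d.size + 1 := by
      rw [PySem.Dict.size_insert, if_neg (by simp [hc'])]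
    refine ⟨⟨?_, ?_⟩, by simp [hnone], ?_, ?_⟩
    · intro c₁ c₂ v h1 h2
      rw [PySem.Dict.get?_insert] at h1 h2
      split_ifs at h1 h2 with e1 e2 e2
      · subst e1 e2; rfl
      · exfalso; have := hd.2 c₂ v h2; simp only [Option.some.injEq] at h1; omega
      · exfalso; have := hd.2 c₁ v h1; simp only [Option.some.injEq] at h2; omega
      · exact hd.1 c₁ c₂ v h1 h2
    · intro c' v h
      rw [PySem.Dict.get?_insert] at h
      rw [hsize]
      split_ifs at h with e
      · simp only [Option.some.injEq] at h; push_cast; omega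
      · have := hd.2 c' v h; push_cast; omega
    · intro c' v h
      have hne : c' ≠ c := by
        intro e; rw [e, hnone] at h; exact absurd h (by simp)
      rw [PySem.Dict.get?_insert, if_neg hne]
      exact h
    · simp [hnone]

theorem intern_main :
    ∀ (cols : List (List (Option Char))) (d : PySem.Dict (List (Option Char)) Int) (out : List Int),
      InvD d →
      InvD (cols.foldl internStep (d, out)).1 ∧
      (∃ tail, (cols.foldl internStep (d, out)).2 = out ++ tail ∧
        tail.length = cols.length) ∧
      (∀ c v, d.get? c = some v → (cols.foldl internStep (d, out)).1.get? c = some v) ∧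
      (∀ j, (hj : j < cols.length) →
        (cols.foldl internStep (d, out)).1.get? (cols[j]) =
          some ((cols.foldl internStep (d, out)).2.getD (out.length + j) 0)) := by
  intro cols
  induction cols with
  | nil =>
    intro d out hd
    exact ⟨hd, ⟨[], by simp, rfl⟩, fun c v h => h, fun j hj => absurd hj (by simp)⟩
  | cons c rest ih =>
    intro d out hd
    obtain ⟨hi1, hi2, hi3, hi4⟩ := internStep_inv d out c hd
    set v1 := ((d.get? c).getD (d.size : Int)) with hv1
    have hfold : (c :: rest).foldl internStep (d, out) =
        rest.foldl internStep (internStep (d, out) c) := rfl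
    have hstep : internStep (d, out) c = ((internStep (d, out) c).1, out ++ [v1]) := by
      rw [← hi2]
    obtain ⟨hj1, ⟨tail, htail, htlen⟩, hj3, hj4⟩ := ih (internStep (d, out) c).1 (out ++ [v1]) hi1
    rw [hfold, hstep]
    refine ⟨hj1, ⟨v1 :: tail, by simp [htail], by simp [htlen]⟩, ?_, ?_⟩
    · intro c' v h; exact hj3 c' v (hi3 c' v h)
    · intro j hj
      cases j with
      | zero =>
        simp only [List.getElem_cons_zero, Nat.add_zero]
        have := hj3 c v1 hi4
        rw [this, htail]
        have : (out ++ [v1] ++ tail).getD out.length 0 = v1 := by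
          rw [List.append_assoc, List.getD_eq_getElem?_getD, List.getElem?_append_right (by simp)]
          simp
        rw [this]
      | succ k =>
        have hk : k < rest.length := by simpa using hj
        have := hj4 k hk
        simp only [List.length_append, List.length_cons, List.length_nil] at this ⊢
        rw [List.getElem_cons_succ]
        convert this using 3
        omega

theorem cid_iff (cols : List (List (Option Char))) (cid : List Int)
    (hcid : cid = (cols.foldl internStep (PySem.Dict.empty, [])).2) (l r : Nat)
    (hl : l < cols.length) (hr : r < cols.length) :
    (cid.getD l 0 = cid.getD r 0) ↔ cols[l] = cols[r] := by
  subst hcid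
  have hinv : InvD PySem.Dict.empty := by
    constructor
    · intro c₁ c₂ v h; rw [PySem.Dict.get?_empty] at h; exact absurd h (by simp)
    · intro c v h; rw [PySem.Dict.get?_empty] at h; exact absurd h (by simp)
  obtain ⟨hf1, _, _, hf4⟩ := intern_main cols PySem.Dict.empty [] hinv
  have hgl := hf4 l hl
  have hgr := hf4 r hr
  simp only [List.length_nil, Nat.zero_add] at hgl hgr
  constructor
  · intro he
    rw [he] at hgl
    exact hf1.1 _ _ _ hgl hgr
  · intro he
    rw [he] at hgl
    rw [hgl] at hgr
    exact Option.some.injEq _ _ ▸ (by simpa using hgr)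

theorem cid_length (cols : List (List (Option Char))) :
    (cols.foldl internStep (PySem.Dict.empty, [])).2.length = cols.length := by
  have hinv : InvD PySem.Dict.empty := by
    constructor
    · intro c₁ c₂ v h; rw [PySem.Dict.get?_empty] at h; exact absurd h (by simp)
    · intro c v h; rw [PySem.Dict.get?_empty] at h; exact absurd h (by simp)
  obtain ⟨_, ⟨tail, ht, htl⟩, _, _⟩ := intern_main cols PySem.Dict.empty [] hinv
  simp [ht, htl]

theorem colOf_length (grid : List String) (j : Int) : (colOf grid j).length = grid.length := by
  simp [colOf]

theorem getCols_eq (grid : List String) (w : Nat) (j : Int) (h0 : 0 ≤ j) (hj : j < (w : Int)) :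
    PySem.List.pyGetD ((List.range w).map (fun (c : Nat) => colOf grid (c : Int))) j [] =
      colOf grid j := by
  rw [PySem.List.pyGetD_eq_getElem _ _ h0 (by simp; omega)]
  rw [List.getElem_map, List.getElem_range, Int.toNat_of_nonneg h0]

theorem cond_iff (grid : List String) (w : Nat) (i : Nat) (hi : i + 1 < w)
    (cols : List (List (Option Char)))
    (hcols : cols = (List.range w).map (fun (c : Nat) => colOf grid (c : Int)))
    (cid : List Int) (hcid : cid = (cols.foldl internStep (PySem.Dict.empty, [])).2)
    (bad : List (Int × Int))
    (hbad : bad = ((PySem.List.pyRange (i : Int) (-1) (-1)).zip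
        (PySem.List.pyRange ((i : Int) + 1) (w : Int) 1)).filter
        (fun p => PySem.List.pyGetD cid p.1 0 != PySem.List.pyGetD cid p.2 0)) :
    (bad.length = 1 ∧ diffCount (PySem.List.pyGetD cols (bad.headD (0, 0)).1 [])
        (PySem.List.pyGetD cols (bad.headD (0, 0)).2 []) = 1)
      ↔ getColDiffLoop grid (w : Int) (i : Int) ((i : Int) + 1) 0 = 1 := by
  have hcl : cols.length = w := by simp [hcols]
  have hcidl : cid.length = w := by rw [hcid, cid_length, hcl]
  set L := ((PySem.List.pyRange (i : Int) (-1) (-1)).zip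
      (PySem.List.pyRange ((i : Int) + 1) (w : Int) 1)) with hL
  have hmem : ∀ p ∈ L, 0 ≤ p.1 ∧ p.1 < (w : Int) ∧ 0 ≤ p.2 ∧ p.2 < (w : Int) := by
    rintro ⟨a, b⟩ hp
    obtain ⟨h1, h2⟩ := List.of_mem_zip hp
    rw [PySem.List.mem_pyRange_neg_one] at h1
    rw [PySem.List.mem_pyRange_one] at h2
    simp only
    omega
  have hcolget : ∀ (j : Int) (h0 : 0 ≤ j) (hj : j < (w : Int)),
      cols[j.toNat]'(by omega) = colOf grid j := by
    intro j h0 hj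
    subst hcols
    rw [List.getElem_map, List.getElem_range, Int.toNat_of_nonneg h0]
  have hkey : ∀ p ∈ L,
      ((PySem.List.pyGetD cid p.1 0 != PySem.List.pyGetD cid p.2 0) =
        decide (cnt ((colOf grid p.1).zip (colOf grid p.2)) ≠ 0)) := by
    intro p hp
    obtain ⟨h1, h2, h3, h4⟩ := hmem p hp
    have e1 : PySem.List.pyGetD cid p.1 0 = cid.getD p.1.toNat 0 := by
      rw [PySem.List.pyGetD_eq_getElem _ _ h1 (by omega), List.getD_eq_getElem _ _ (by omega)]
    have e2 : PySem.List.pyGetD cid p.2 0 = cid.getD p.2.toNat 0 := by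
      rw [PySem.List.pyGetD_eq_getElem _ _ h3 (by omega), List.getD_eq_getElem _ _ (by omega)]
    have hiff1 := cid_iff cols cid hcid p.1.toNat p.2.toNat (by omega) (by omega)
    have hcc1 : cols[p.1.toNat]'(by omega) = colOf grid p.1 := hcolget p.1 h1 h2
    have hcc2 : cols[p.2.toNat]'(by omega) = colOf grid p.2 := hcolget p.2 h3 h4
    have hiff2 : (PySem.List.pyGetD cid p.1 0 = PySem.List.pyGetD cid p.2 0) ↔
        cnt ((colOf grid p.1).zip (colOf grid p.2)) = 0 := by
      rw [e1, e2, hiff1, hcc1, hcc2]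
      exact (cnt_zip_eq_zero_iff _ _ (by rw [colOf_length, colOf_length])).symm
    by_cases hEq : PySem.List.pyGetD cid p.1 0 = PySem.List.pyGetD cid p.2 0
    · simp [hEq, hiff2.mp hEq]
    · have : cnt ((colOf grid p.1).zip (colOf grid p.2)) ≠ 0 := fun h => hEq (hiff2.mpr h)
      simp [hEq, this]
  have hbad2 : bad = L.filter
      (fun p => decide (cnt ((colOf grid p.1).zip (colOf grid p.2)) ≠ 0)) := by
    rw [hbad]
    exact List.filter_congr hkey
  have hf : ∀ p ∈ L, 0 ≤ cnt ((colOf grid p.1).zip (colOf grid p.2)) := fun p _ => cnt_nonneg _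
  rw [loop_eq_one_iff, mirrorCnt_eq_pairSumF, ← hL,
    sum_eq_one_iff (fun p => cnt ((colOf grid p.1).zip (colOf grid p.2))) L hf, ← hbad2]
  refine and_congr_right fun hlen => ?_
  have hne : bad ≠ [] := by intro h; rw [h] at hlen; simp at hlen
  have hhd : bad.headD (0, 0) ∈ bad := by
    cases bad with
    | nil => exact absurd rfl hne
    | cons x xs => simp
  have hin : bad.headD (0, 0) ∈ L := by
    have hm : bad.headD (0, 0) ∈ List.filter
        (fun p => decide (cnt ((colOf grid p.1).zip (colOf grid p.2)) ≠ 0)) L := by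
      rw [← hbad2]; exact hhd
    exact List.mem_of_mem_filter hm
  obtain ⟨h1, h2, h3, h4⟩ := hmem _ hin
  rw [hcols, getCols_eq grid w _ h1 h2, getCols_eq grid w _ h3 h4, diffCount_eq_cnt]

theorem folds_eq (grid : List String) (w : Nat) (hw : 2 ≤ w)
    (hwlen : PySem.Str.len (grid.headD "") = (w : Int))
    (cols : List (List (Option Char)))
    (hcols : cols = (List.range w).map (fun (c : Nat) => colOf grid (c : Int)))
    (cid : List Int) (hcid : cid = (cols.foldl internStep (PySem.Dict.empty, [])).2) :
    ∀ m : Nat, m ≤ w - 1 →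
    ((PySem.List.pyRange 0 (m : Int) 1).foldl
      (fun (st : Int × Int) i =>
        let leftSum := st.1 + 1
        if getColDiff grid i = 1 then (leftSum, st.2 + leftSum) else (leftSum, st.2)) (0, 0))
    = ((m : Int),
       (List.range m).foldl
        (fun (total : Int) (i : Nat) =>
          let bad := ((PySem.List.pyRange (i : Int) (-1) (-1)).zip
                      (PySem.List.pyRange ((i : Int) + 1) (w : Int) 1)).filter
            (fun p => PySem.List.pyGetD cid p.1 0 != PySem.List.pyGetD cid p.2 0)
          if bad.length = 1 then
            let p := bad.headD (0, 0)
            if diffCount (PySem.List.pyGetD cols p.1 []) (PySem.List.pyGetD cols p.2 []) = 1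
            then total + ((i : Int) + 1) else total
          else total) 0) := by
  intro m
  induction m with
  | zero => intro _; simp [PySem.List.pyRange_one_eq_nil]
  | succ m ih =>
    intro hm
    have hrange : PySem.List.pyRange 0 ((m : Int) + 1) 1 =
        PySem.List.pyRange 0 (m : Int) 1 ++ [(m : Int)] :=
      PySem.List.pyRange_one_succ_right (by omega)
    have hc : (((m + 1 : Nat)) : Int) = (m : Int) + 1 := by push_cast; ring
    rw [hc, hrange, List.range_succ, List.foldl_append, List.foldl_append, ih (by omega)]
    simp only [List.foldl]
    have hiff := cond_iff grid w m (by omega) cols hcols cid hcid _ rfl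
    simp only [getColDiff, hwlen]
    by_cases hb1 : (((PySem.List.pyRange (m : Int) (-1) (-1)).zip
        (PySem.List.pyRange ((m : Int) + 1) (w : Int) 1)).filter
        (fun p => PySem.List.pyGetD cid p.1 0 != PySem.List.pyGetD cid p.2 0)).length = 1
    · by_cases hb2 : diffCount
          (PySem.List.pyGetD cols ((((PySem.List.pyRange (m : Int) (-1) (-1)).zip
            (PySem.List.pyRange ((m : Int) + 1) (w : Int) 1)).filter
            (fun p => PySem.List.pyGetD cid p.1 0 != PySem.List.pyGetD cid p.2 0)).headD (0, 0)).1 [])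
          (PySem.List.pyGetD cols ((((PySem.List.pyRange (m : Int) (-1) (-1)).zip
            (PySem.List.pyRange ((m : Int) + 1) (w : Int) 1)).filter
            (fun p => PySem.List.pyGetD cid p.1 0 != PySem.List.pyGetD cid p.2 0)).headD (0, 0)).2 []) = 1
      · rw [if_pos (hiff.mp ⟨hb1, hb2⟩), if_pos hb1, if_pos hb2]
      · rw [if_neg (fun hA => hb2 (hiff.mpr hA).2), if_pos hb1, if_neg hb2]
    · rw [if_neg (fun hA => hb1 (hiff.mpr hA).1), if_neg hb1]

-- ===== VERDICT (by name: the statement is the Claim_ definition above) =====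
theorem new_cols_spec : Claim_equal_new_cols := by
  intro grid _ _
  unfold Spec_new_cols new_cols new_cols_alt
  set w : Nat := (grid.headD "").toList.length with hw
  have hwlen : PySem.Str.len (grid.headD "") = (w : Int) := by
    simp [PySem.Str.len_eq, hw]
  by_cases hsmall : w < 2
  · rw [if_pos hsmall, hwlen]
    rw [PySem.List.pyRange_one_eq_nil (by omega)]
    simp
  · rw [if_neg hsmall, hwlen]
    have h1 : (w : Int) - 1 = ((w - 1 : Nat) : Int) := by omega
    rw [h1]
    have := folds_eq grid w (by omega) hwlen
      ((List.range w).map (fun (c : Nat) => colOf grid (c : Int))) rfl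
      (((List.range w).map (fun (c : Nat) => colOf grid (c : Int))).foldl internStep
        (PySem.Dict.empty, [])).2 rfl (w - 1) le_rfl
    rw [this]
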